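-- pv_equiv track=rewrite | github.com/rkya/ai_golomb_ruler | submit.py | calculateLegalValuesCP
-- ===== SOURCE A (Python) =====
-- def calculateLegalValuesCP(distance, assignedVariables, remainingLegalValues):
--     temp = remainingLegalValues[:]
--     for value in remainingLegalValues:
--         for marker in distance:
--             newDistance = abs(value - marker)
--             if newDistance in distance or newDistance in assignedVariables:
--                 if value in temp:
--                     # Remove this value from the set of legal values for all its neighbours
--                     temp.remove(value)
--     return temp[:]
-- ===== SOURCE B (Python) =====
-- def calculateLegalValuesCP(distance, assignedVariables, remainingLegalValues):
--     banned = set(distance) | set(assignedVariables)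
--     return [v for v in remainingLegalValues
--             if not any(abs(v - m) in banned for m in distance)]
-- ===== Notes on version B (the rewrite author's own statement) =====
-- stated objective: faster
-- what changed: B precomputes one hash set of all banned pairwise distances (set(distance) | set(assignedVariables)) and returns a pure single-pass filter of remainingLegalValues, eliminating A's mutable working copy with its repeated list membership scans and list.remove calls.
import Mathlib
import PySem

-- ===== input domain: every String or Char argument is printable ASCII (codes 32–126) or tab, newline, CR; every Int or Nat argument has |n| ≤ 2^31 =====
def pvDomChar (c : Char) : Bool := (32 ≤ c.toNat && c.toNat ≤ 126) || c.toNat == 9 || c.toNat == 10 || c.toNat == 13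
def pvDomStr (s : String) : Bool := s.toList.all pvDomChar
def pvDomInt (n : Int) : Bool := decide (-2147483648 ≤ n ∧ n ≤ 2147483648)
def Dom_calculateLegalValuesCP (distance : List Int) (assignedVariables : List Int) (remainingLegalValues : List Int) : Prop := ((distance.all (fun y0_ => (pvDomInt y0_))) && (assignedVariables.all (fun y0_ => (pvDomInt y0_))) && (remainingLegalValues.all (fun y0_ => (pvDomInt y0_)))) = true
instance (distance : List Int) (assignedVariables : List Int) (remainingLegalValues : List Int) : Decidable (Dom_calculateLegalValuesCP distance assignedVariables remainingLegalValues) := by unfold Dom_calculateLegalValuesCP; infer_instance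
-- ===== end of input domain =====

-- B precomputes one hash set of all banned pairwise distances and returns a pure single-pass
-- filter of the legal values, replacing A's mutable copy with its repeated list membership
-- scans and list.remove calls (objective: faster).

-- ===== PORT A =====
def calculateLegalValuesCP (distance : List Int) (assignedVariables : List Int) (remainingLegalValues : List Int) : List Int :=
  -- temp = remainingLegalValues[:]
  let temp := remainingLegalValues;
  let temp :=
    remainingLegalValues.foldl (fun temp value =>
      distance.foldl (fun temp marker =>
        let newDistance := |value - marker|
        if newDistance ∈ distance ∨ newDistance ∈ assignedVariables then
          if value ∈ temp then
            -- temp.remove(value); membership guard makes remove? a some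
            (PySem.List.remove? temp value).getD temp
          else temp
        else temp) temp) temp;
  temp

-- ===== PORT B =====
def calculateLegalValuesCP_alt (distance : List Int) (assignedVariables : List Int) (remainingLegalValues : List Int) : List Int :=
  -- banned = set(distance) | set(assignedVariables)
  let banned : PySem.Set Int := PySem.Set.union (PySem.Set.ofList distance) assignedVariables;
  remainingLegalValues.filter (fun v =>
    !(distance.any (fun m => PySem.Set.contains banned (|v - m|))))

-- ===== PRECONDITION & SPEC =====
def Spec_calculateLegalValuesCP (distance : List Int) (assignedVariables : List Int) (remainingLegalValues : List Int) (out : List Int) : Prop := out = calculateLegalValuesCP_alt distance assignedVariables remainingLegalValues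
instance (distance : List Int) (assignedVariables : List Int) (remainingLegalValues : List Int) (out : List Int) : Decidable (Spec_calculateLegalValuesCP distance assignedVariables remainingLegalValues out) := by unfold Spec_calculateLegalValuesCP; infer_instance

-- ===== CLAIM (what is proved, stated in full; the proofs are below) =====
def Claim_equal_calculateLegalValuesCP : Prop := ∀ (distance : List Int) (assignedVariables : List Int) (remainingLegalValues : List Int), Dom_calculateLegalValuesCP distance assignedVariables remainingLegalValues → Spec_calculateLegalValuesCP distance assignedVariables remainingLegalValues (calculateLegalValuesCP distance assignedVariables remainingLegalValues)

-- ===== LEMMAS AND PROOFS =====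

-- the trigger test for a value/marker pair (depends only on the value, never on temp)
def pvTrig (distance assignedVariables : List Int) (v m : Int) : Bool :=
  decide (|v - m| ∈ distance ∨ |v - m| ∈ assignedVariables)

-- a value is banned iff some marker triggers
def pvBad (distance assignedVariables : List Int) (v : Int) : Bool :=
  distance.any (pvTrig distance assignedVariables v)

-- A's inner-loop step is "erase one occurrence of value if the marker triggers"
theorem innerStep_eq (distance assignedVariables : List Int) (v m : Int) (t : List Int) :
    (let newDistance := |v - m|
     if newDistance ∈ distance ∨ newDistance ∈ assignedVariables then
       if v ∈ t then (PySem.List.remove? t v).getD t else t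
     else t)
    = (if pvTrig distance assignedVariables v m then t.erase v else t) := by
  simp only [pvTrig, decide_eq_true_eq]
  split_ifs with h1 h2
  · rw [PySem.List.remove?_eq_some_erase t v h2]; rfl
  · rw [List.erase_of_not_mem h2]
  · rfl

-- the conditional-erase fold: counts of v drop by the number of triggers (truncated)
theorem foldl_erase_count (p : Int → Bool) (v : Int) :
    ∀ (ds : List Int) (t : List Int),
      (ds.foldl (fun t m => if p m then t.erase v else t) t).count v
        = t.count v - (ds.filter p).length := by
  intro ds
  induction ds with
  | nil => intro t; simp
  | cons d ds ih =>
    intro t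
    by_cases h : p d
    · simp only [List.foldl_cons, h, if_pos, List.filter_cons_of_pos h, List.length_cons]
      rw [ih, List.count_erase_self]
      omega
    · simp [List.foldl_cons, h, ih t]

theorem foldl_erase_count_ne (p : Int → Bool) (v w : Int) (hw : w ≠ v) :
    ∀ (ds : List Int) (t : List Int),
      (ds.foldl (fun t m => if p m then t.erase v else t) t).count w = t.count w := by
  intro ds
  induction ds with
  | nil => intro t; simp
  | cons d ds ih =>
    intro t
    by_cases h : p d
    · simp only [List.foldl_cons, h, if_pos, ih, List.count_erase_of_ne hw]
    · simp [List.foldl_cons, h, ih t]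

theorem foldl_erase_of_no_trig (p : Int → Bool) (v : Int) (ds : List Int)
    (h : (ds.filter p).length = 0) (t : List Int) :
    ds.foldl (fun t m => if p m then t.erase v else t) t = t := by
  induction ds generalizing t with
  | nil => rfl
  | cons d ds ih =>
    cases hd : p d
    · rw [List.foldl_cons]
      simp only [hd, Bool.false_eq_true, if_neg, not_false_iff]
      exact ih (by simpa [hd] using h) t
    · simp [hd] at h

-- erasing a q-rejected element does not change the q-filter
theorem filter_erase_of_neg (q : Int → Bool) (v : Int) (hv : q v = false) (t : List Int) :
    (t.erase v).filter q = t.filter q := by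
  induction t with
  | nil => rfl
  | cons x xs ih =>
    by_cases hx : x = v
    · subst hx
      rw [List.erase_cons_head]
      simp [hv]
    · have hne : ¬(x == v) = true := by simp [hx]
      rw [List.erase_cons_tail hne]
      simp [List.filter_cons, ih]

theorem foldl_erase_filter (p q : Int → Bool) (v : Int) (hv : q v = false) :
    ∀ (ds : List Int) (t : List Int),
      (ds.foldl (fun t m => if p m then t.erase v else t) t).filter q = t.filter q := by
  intro ds
  induction ds with
  | nil => intro t; rfl
  | cons d ds ih =>
    intro t
    by_cases h : p d
    · simp only [List.foldl_cons, h, if_pos, ih, filter_erase_of_neg q v hv]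
    · simp [List.foldl_cons, h, ih t]

-- pvBad v ↔ the trigger count for v is positive
theorem bad_iff_pos (distance assignedVariables : List Int) (v : Int) :
    pvBad distance assignedVariables v = true
      ↔ 0 < (distance.filter (pvTrig distance assignedVariables v)).length := by
  simp [pvBad, List.any_eq_true, List.length_pos_iff, List.eq_nil_iff_forall_not_mem,
    List.mem_filter]

-- A's outer loop computes the filter, provided temp never holds more copies of a bad value than rem
theorem outer_fold (distance assignedVariables : List Int) :
    ∀ (rem t : List Int),
      (∀ v, pvBad distance assignedVariables v = true → t.count v ≤ rem.count v) →
      rem.foldl (fun temp value =>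
          distance.foldl (fun temp m =>
            if pvTrig distance assignedVariables value m then temp.erase value else temp) temp) t
        = t.filter (fun v => !(pvBad distance assignedVariables v)) := by
  intro rem
  induction rem with
  | nil =>
    intro t h
    rw [List.foldl_nil]
    symm
    rw [List.filter_eq_self]
    intro a ha
    by_contra hb
    have hbad : pvBad distance assignedVariables a = true := by
      cases hh : pvBad distance assignedVariables a
      · simp [hh] at hb
      · rfl
    have h1 := h a hbad
    have h2 : t.count a = 0 := by simpa using h1
    exact absurd ((List.count_pos_iff).mpr ha) (by omega)
  | cons r rs ih =>
    intro t h
    rw [List.foldl_cons]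
    set t' := distance.foldl (fun temp m =>
      if pvTrig distance assignedVariables r m then temp.erase r else temp) t with ht'
    have hcount : t'.count r
        = t.count r - (distance.filter (pvTrig distance assignedVariables r)).length := by
      rw [ht']; exact foldl_erase_count _ r distance t
    have hcount_ne : ∀ w, w ≠ r → t'.count w = t.count w := by
      intro w hw
      rw [ht']; exact foldl_erase_count_ne _ r w hw distance t
    have hrec : ∀ v, pvBad distance assignedVariables v = true → t'.count v ≤ rs.count v := by
      intro v hv
      by_cases hvr : v = r
      · subst hvr
        have hkpos := (bad_iff_pos distance assignedVariables v).mp hv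
        have h1 := h v hv
        have h2 : List.count v (v :: rs) = List.count v rs + 1 := by
          simp
        omega
      · have h1 := h v hv
        have h2 : List.count v (r :: rs) = List.count v rs := by
          simp [List.count_cons]
          intro hh; exact hvr hh.symm
        rw [hcount_ne v hvr]
        omega
    rw [ih t' hrec]
    by_cases hb : pvBad distance assignedVariables r = true
    · rw [ht', foldl_erase_filter _ _ r (by simp [hb]) distance t]
    · have hk0 : (distance.filter (pvTrig distance assignedVariables r)).length = 0 := by
        cases hh : pvBad distance assignedVariables r
        · by_contra hne
          exact hb ((bad_iff_pos distance assignedVariables r).mpr (by omega))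
        · exact absurd hh hb
      rw [ht', foldl_erase_of_no_trig _ r distance hk0 t]

-- the banned-distance set test agrees with the trigger test
theorem contains_union_trig (distance assignedVariables : List Int) (v m : Int) :
    PySem.Set.contains (PySem.Set.union (PySem.Set.ofList distance) assignedVariables) (|v - m|)
      = pvTrig distance assignedVariables v m := by
  set S := PySem.Set.union (PySem.Set.ofList distance) assignedVariables with hS
  have hmem : |v - m| ∈ S ↔ (|v - m| ∈ distance ∨ |v - m| ∈ assignedVariables) := by
    rw [hS, PySem.Set.mem_union, PySem.Set.mem_ofList]
  cases hc : PySem.Set.contains S (|v - m|)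
  · cases ht : pvTrig distance assignedVariables v m
    · rfl
    · rw [pvTrig, decide_eq_true_eq] at ht
      have hcc := (PySem.Set.contains_iff S (|v - m|)).mpr (hmem.mpr ht)
      rw [hc] at hcc
      cases hcc
  · rw [pvTrig]
    symm
    rw [decide_eq_true_eq]
    exact hmem.mp ((PySem.Set.contains_iff S (|v - m|)).mp hc)

-- ===== VERDICT (by name: the statement is the Claim_ definition above) =====
theorem calculateLegalValuesCP_spec : Claim_equal_calculateLegalValuesCP := by
  intro distance assignedVariables remainingLegalValues _
  unfold Spec_calculateLegalValuesCP calculateLegalValuesCP calculateLegalValuesCP_alt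
  have hstep :
      (fun (temp : List Int) value =>
        distance.foldl (fun temp marker =>
          let newDistance := |value - marker|
          if newDistance ∈ distance ∨ newDistance ∈ assignedVariables then
            if value ∈ temp then (PySem.List.remove? temp value).getD temp else temp
          else temp) temp)
      = (fun (temp : List Int) value =>
        distance.foldl (fun temp m =>
          if pvTrig distance assignedVariables value m then temp.erase value else temp) temp) := by
    funext temp value
    congr 1
    funext t m
    exact innerStep_eq distance assignedVariables value m t
  simp only [hstep]
  rw [outer_fold distance assignedVariables remainingLegalValues remainingLegalValues
    (fun v _ => le_refl _)]
  apply List.filter_congr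
  intro v _
  congr 1
  rw [pvBad]
  congr 1
  funext m
  exact (contains_union_trig distance assignedVariables v m).symm
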